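-- pv_equiv track=rewrite | github.com/Ga420Low/project-os-core | src/project_os_core/github/parsing.py | labels_to_severity
-- ===== SOURCE A (Python) =====
-- def labels_to_severity(labels: list[str]) -> str:
--     lowered = {item.lower() for item in labels}
--     if "p1-critical" in lowered:
--         return "critical"
--     if "p2-important" in lowered:
--         return "high"
--     if "p3-minor" in lowered:
--         return "medium"
--     return "info"
-- ===== SOURCE B (Python) =====
-- _SEVERITY_BY_RANK = ["critical", "high", "medium", "info"]
-- _RANK = {"p1-critical": 0, "p2-important": 1, "p3-minor": 2}
--
-- def labels_to_severity(labels: list[str]) -> str: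
--     best = 3
--     for label in labels:
--         r = _RANK.get(label.lower(), 3)
--         if r < best:
--             best = r
--     return _SEVERITY_BY_RANK[best]
-- ===== Notes on version B (the rewrite author's own statement) =====
-- stated objective: alternative
-- what changed: Replaced the built set plus three sequential ordered membership checks with a single pass keeping a running best-rank accumulator via a label-to-rank table, indexing a severity table at the end.
import Mathlib
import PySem

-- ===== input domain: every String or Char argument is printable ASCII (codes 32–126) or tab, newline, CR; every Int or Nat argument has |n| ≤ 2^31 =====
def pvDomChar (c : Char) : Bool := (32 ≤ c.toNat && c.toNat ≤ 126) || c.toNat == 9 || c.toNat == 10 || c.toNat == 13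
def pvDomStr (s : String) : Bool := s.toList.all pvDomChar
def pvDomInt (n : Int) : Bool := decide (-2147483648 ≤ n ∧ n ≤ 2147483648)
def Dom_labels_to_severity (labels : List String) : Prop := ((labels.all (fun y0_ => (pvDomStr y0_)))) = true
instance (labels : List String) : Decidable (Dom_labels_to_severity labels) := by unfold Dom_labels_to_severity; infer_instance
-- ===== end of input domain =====

-- B replaces A's built set and three ordered membership checks by a single best-rank accumulator loop; return values proved equal on Dom (alternative decomposition, same cost).
-- ===== PORT A =====
def labels_to_severity (labels : List String) : String :=
  let lowered : PySem.Set String := PySem.Set.ofList (labels.map (fun item => PySem.Str.lower item))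
  if PySem.Set.contains lowered "p1-critical" then "critical"
  else if PySem.Set.contains lowered "p2-important" then "high"
  else if PySem.Set.contains lowered "p3-minor" then "medium"
  else "info"

-- ===== PORT B =====
-- _RANK.get(label, 3): the literal dict lookup ported as a first-match if-chain
def rankGetD (s : String) : Nat :=
  if s = "p1-critical" then 0 else if s = "p2-important" then 1 else if s = "p3-minor" then 2 else 3

def sevByRank : List String := ["critical", "high", "medium", "info"]

def labels_to_severity_alt (labels : List String) : String :=
  let best := labels.foldl (fun best label =>
    let r := rankGetD (PySem.Str.lower label)
    if r < best then r else best) 3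
  -- list index _SEVERITY_BY_RANK[best]; best ≤ 3 always, so the none (IndexError) branch is dead
  (PySem.List.pyGet? sevByRank (best : Int)).getD ""

-- ===== PRECONDITION & SPEC =====
def Spec_labels_to_severity (labels : List String) (out : String) : Prop := out = labels_to_severity_alt labels
instance (labels : List String) (out : String) : Decidable (Spec_labels_to_severity labels out) := by unfold Spec_labels_to_severity; infer_instance

-- ===== CLAIM (what is proved, stated in full; the proofs are below) =====
def Claim_equal_labels_to_severity : Prop := ∀ (labels : List String), Dom_labels_to_severity labels → Spec_labels_to_severity labels (labels_to_severity labels)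

-- ===== LEMMAS AND PROOFS =====

-- ===== VERDICT (by name: the statement is the Claim_ definition above) =====
-- the accumulator loop computes the min of b and the best rank over the list (for b ≤ 3)
theorem foldl_rank_min (labels : List String) (b : Nat) (hb : b ≤ 3) :
    labels.foldl (fun best label =>
      if rankGetD (PySem.Str.lower label) < best then rankGetD (PySem.Str.lower label) else best) b
    = min b (labels.foldl (fun best label =>
        if rankGetD (PySem.Str.lower label) < best then rankGetD (PySem.Str.lower label) else best) 3) := by
  induction labels generalizing b with
  | nil => simp; omega
  | cons l ls ih =>
    have hr : rankGetD (PySem.Str.lower l) ≤ 3 := by unfold rankGetD; split_ifs <;> omega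
    simp only [List.foldl_cons]
    rw [ih _ (by split_ifs <;> omega),
        ih (if rankGetD (PySem.Str.lower l) < 3 then rankGetD (PySem.Str.lower l) else 3)
          (by split_ifs <;> omega)]
    split_ifs <;> omega

theorem best_characterization (labels : List String) :
    labels.foldl (fun best label =>
      if rankGetD (PySem.Str.lower label) < best then rankGetD (PySem.Str.lower label) else best) 3
    = (if "p1-critical" ∈ labels.map (fun item => PySem.Str.lower item) then 0
       else if "p2-important" ∈ labels.map (fun item => PySem.Str.lower item) then 1
       else if "p3-minor" ∈ labels.map (fun item => PySem.Str.lower item) then 2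
       else 3) := by
  induction labels with
  | nil => simp
  | cons l ls ih =>
    simp only [List.foldl_cons, List.map_cons, List.mem_cons]
    rw [foldl_rank_min _ _ (by unfold rankGetD; split_ifs <;> omega), ih]
    by_cases h1 : PySem.Str.lower l = "p1-critical" <;>
    by_cases h2 : PySem.Str.lower l = "p2-important" <;>
    by_cases h3 : PySem.Str.lower l = "p3-minor" <;>
    by_cases m1 : "p1-critical" ∈ ls.map (fun item => PySem.Str.lower item) <;>
    by_cases m2 : "p2-important" ∈ ls.map (fun item => PySem.Str.lower item) <;>
    by_cases m3 : "p3-minor" ∈ ls.map (fun item => PySem.Str.lower item) <;>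
      simp [rankGetD, h1, h2, h3, m1, m2, m3] <;>
      first
        | exact fun h => h1 h.symm
        | (split_ifs <;> simp_all)

theorem labels_to_severity_spec : Claim_equal_labels_to_severity := by
  intro labels _
  show labels_to_severity labels = labels_to_severity_alt labels
  unfold labels_to_severity labels_to_severity_alt
  show _ = (PySem.List.pyGet? sevByRank ((labels.foldl (fun best label =>
      if rankGetD (PySem.Str.lower label) < best then rankGetD (PySem.Str.lower label) else best) 3 : Nat) : Int)).getD ""
  rw [best_characterization]
  simp only [PySem.Set.contains_eq_listContains, List.contains_iff_mem, PySem.Set.mem_ofList]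
  by_cases h1 : "p1-critical" ∈ labels.map (fun item => PySem.Str.lower item) <;>
  by_cases h2 : "p2-important" ∈ labels.map (fun item => PySem.Str.lower item) <;>
  by_cases h3 : "p3-minor" ∈ labels.map (fun item => PySem.Str.lower item) <;>
    simp [h1, h2, h3, sevByRank, PySem.List.pyGet?, PySem.List.pyIdx?]
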